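-- pv_equiv track=rewrite | github.com/Kohei-Oyama/Kadai | kadai_1.py | cal_4times_2
-- ===== SOURCE A (Python) =====
-- def cal_4times_2(n):
--     #4の倍数であり8の倍数でない
--     c = 0
--     for i in range(1,n-1):
--         k = i*(i+1)*(i+2)
--         if k % 4 == 0 and k % 8 != 0:
--             c += 1
--     else:
--         return c
-- ===== SOURCE B (Python) =====
-- def cal_4times_2(n):
--     # Closed form: k = i*(i+1)*(i+2) is divisible by 4 but not 8 exactly when
--     # i % 8 == 3, so count such i in [1, n-2] directly.
--     return max(0, (n - 5) // 8 + 1)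
-- ===== Notes on version B (the rewrite author's own statement) =====
-- stated objective: faster
-- what changed: Replaced the O(n) loop testing divisibility of i*(i+1)*(i+2) by a closed-form count of i == 3 (mod 8) in [1, n-2]: max(0, (n-5)//8 + 1).
import Mathlib
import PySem

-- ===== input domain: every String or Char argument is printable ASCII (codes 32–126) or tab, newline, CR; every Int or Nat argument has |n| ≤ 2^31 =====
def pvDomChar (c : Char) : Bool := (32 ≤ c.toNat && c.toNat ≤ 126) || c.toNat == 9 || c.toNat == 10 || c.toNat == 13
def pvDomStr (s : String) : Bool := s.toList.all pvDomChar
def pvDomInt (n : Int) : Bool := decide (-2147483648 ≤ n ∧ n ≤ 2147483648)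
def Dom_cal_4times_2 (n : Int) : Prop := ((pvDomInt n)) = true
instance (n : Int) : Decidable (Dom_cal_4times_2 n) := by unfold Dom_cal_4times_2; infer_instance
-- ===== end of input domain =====

-- B replaces A's O(n) loop by the closed-form count max(0, (n-5)//8 + 1) (objective: faster, asymptotic).

-- ===== PORT A =====
def cal_4times_2 (n : Int) : Int :=
  (PySem.List.pyRange 1 (n - 1) 1).foldl
    (fun c i =>
      let k := i * (i + 1) * (i + 2)
      if PySem.Int.mod k 4 = 0 ∧ PySem.Int.mod k 8 ≠ 0 then c + 1 else c)
    0

-- ===== PORT B =====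
def cal_4times_2_alt (n : Int) : Int :=
  max 0 (PySem.Int.floordiv (n - 5) 8 + 1)

-- ===== PRECONDITION & SPEC =====
def Spec_cal_4times_2 (n : Int) (out : Int) : Prop := out = cal_4times_2_alt n
instance (n : Int) (out : Int) : Decidable (Spec_cal_4times_2 n out) := by unfold Spec_cal_4times_2; infer_instance

-- ===== CLAIM (what is proved, stated in full; the proofs are below) =====
def Claim_equal_cal_4times_2 : Prop := ∀ (n : Int), Dom_cal_4times_2 n → Spec_cal_4times_2 n (cal_4times_2 n)

-- ===== LEMMAS AND PROOFS =====

-- the loop's test holds exactly for i ≡ 3 (mod 8)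
theorem pv_cond_iff (i : Int) :
    (PySem.Int.mod (i * (i + 1) * (i + 2)) 4 = 0 ∧
     PySem.Int.mod (i * (i + 1) * (i + 2)) 8 ≠ 0) ↔ i % 8 = 3 := by
  rw [PySem.Int.mod_eq_emod_of_pos (show (0:Int) < 4 by norm_num),
      PySem.Int.mod_eq_emod_of_pos (show (0:Int) < 8 by norm_num)]
  have hm : i ≡ i % 8 [ZMOD 8] := (Int.emod_emod_of_dvd i dvd_rfl).symm
  have h8 : i * (i + 1) * (i + 2) ≡ (i % 8) * (i % 8 + 1) * (i % 8 + 2) [ZMOD 8] :=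
    ((hm.mul (hm.add_right 1)).mul (hm.add_right 2))
  have h8' : (i * (i + 1) * (i + 2)) % 8 = ((i % 8) * (i % 8 + 1) * (i % 8 + 2)) % 8 := h8
  have h4 : (i * (i + 1) * (i + 2)) % 4 = ((i * (i + 1) * (i + 2)) % 8) % 4 :=
    (Int.emod_emod_of_dvd _ (by norm_num)).symm
  rw [h4, h8']
  have hr0 : 0 ≤ i % 8 := Int.emod_nonneg i (by norm_num)
  have hr8 : i % 8 < 8 := Int.emod_lt_of_pos i (by norm_num)
  set r := i % 8 with hr
  interval_cases r <;> simp

-- the loop over [1, 2, …, m] counts ⌊(m+5)/8⌋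
theorem pv_loop_count (m : Nat) (c : Int) :
    ((List.range m).map (fun k : Nat => (1 : Int) + (k : Int))).foldl
      (fun c i =>
        let k := i * (i + 1) * (i + 2)
        if PySem.Int.mod k 4 = 0 ∧ PySem.Int.mod k 8 ≠ 0 then c + 1 else c)
      c = c + ((m + 5) / 8 : Nat) := by
  induction m generalizing c with
  | zero => simp
  | succ m ih =>
      rw [List.range_succ, List.map_append, List.foldl_append, ih]
      simp only [List.map_cons, List.map_nil, List.foldl_cons, List.foldl_nil, pv_cond_iff]
      have hcast : ((1 : Int) + (m : Int)) % 8 = (((m + 1) % 8 : Nat) : Int) := by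
        push_cast; omega
      rw [hcast]
      split_ifs with h
      · have h' : (m + 1) % 8 = 3 := by exact_mod_cast h
        have h2 : (m + 1 + 5) / 8 = (m + 5) / 8 + 1 := by omega
        rw [h2]; push_cast; ring
      · have h' : ¬ (m + 1) % 8 = 3 := by exact_mod_cast h
        have h2 : (m + 1 + 5) / 8 = (m + 5) / 8 := by omega
        rw [h2]

-- ===== VERDICT (by name: the statement is the Claim_ definition above) =====
theorem cal_4times_2_spec : Claim_equal_cal_4times_2 := by
  intro n _
  unfold Spec_cal_4times_2 cal_4times_2 cal_4times_2_alt
  rw [PySem.List.pyRange_one, pv_loop_count, PySem.Int.floordiv_eq_ediv_of_pos (show (0:Int) < 8 by norm_num)]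
  omega
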